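-- pv_equiv track=rewrite | github.com/arjunptm/Judgement-game | main.py | calculate_cards_per_round
-- ===== SOURCE A (Python) =====
-- import math
--
-- def calculate_cards_per_round(num_players):
--     max_cards = math.floor(52 / num_players)
--     cards_per_round = []
--
--     # Decreasing
--     for i in range(max_cards, 0, -1):
--         cards_per_round.append(i)
--
--     # Increasing (excluding max_cards as it's already included)
--     for i in range(2, max_cards):
--         cards_per_round.append(i)
--
--     return cards_per_round
-- ===== SOURCE B (Python) =====
-- import math
--
-- def calculate_cards_per_round(num_players):
--     max_cards = math.floor(52 / num_players)
--     if max_cards < 1: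
--         return []
--     return [max_cards] + _vee(max_cards - 1)
--
-- def _vee(i):
--     # V-shaped schedule i, i-1, ..., 2, 1, 2, ..., i-1, i built recursively
--     if i <= 0:
--         return []
--     if i == 1:
--         return [1]
--     return [i] + _vee(i - 1) + [i]
-- ===== Notes on version B (the rewrite author's own statement) =====
-- stated objective: alternative
-- what changed: B builds the V-shaped schedule by a recursive sandwich construction ([i] + vee(i-1) + [i]) instead of A's two independent generating loops with per-element appends.
-- outside the precondition, e.g. on calculate_cards_per_round(0): A raises ZeroDivisionError, B raises ZeroDivisionError
import Mathlib
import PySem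

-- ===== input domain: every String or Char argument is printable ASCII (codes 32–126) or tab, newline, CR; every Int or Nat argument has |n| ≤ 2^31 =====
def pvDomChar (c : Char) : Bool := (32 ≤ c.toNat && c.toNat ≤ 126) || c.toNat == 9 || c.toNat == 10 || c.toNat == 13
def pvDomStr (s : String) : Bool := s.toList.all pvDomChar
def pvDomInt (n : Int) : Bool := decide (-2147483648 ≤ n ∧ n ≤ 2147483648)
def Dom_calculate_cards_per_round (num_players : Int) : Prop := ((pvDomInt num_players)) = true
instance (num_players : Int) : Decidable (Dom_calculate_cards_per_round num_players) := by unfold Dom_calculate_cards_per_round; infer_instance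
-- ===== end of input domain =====

-- B replaces A's two generating loops by a recursive V-shaped sandwich construction (alternative decomposition).
-- ===== PORT A =====
-- math.floor(52 / num_players) equals 52 // num_players exactly for 0 < |num_players| ≤ 2^31
-- (|52/n| ≤ 52; for n not dividing 52 the true quotient is at distance ≥ 1/|n| ≥ 2^-31 from any
-- integer, far above the float error ≈ 2^-46; for n dividing 52 the float division is exact),
-- so both ports use PySem.Int.floordiv.
def calculate_cards_per_round (num_players : Int) : List Int :=
  let max_cards := PySem.Int.floordiv 52 num_players
  -- Decreasing: for i in range(max_cards, 0, -1): append
  let cards1 := (PySem.List.pyRange max_cards 0 (-1)).foldl (fun acc i => acc ++ [i]) []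
  -- Increasing: for i in range(2, max_cards): append
  (PySem.List.pyRange 2 max_cards 1).foldl (fun acc i => acc ++ [i]) cards1

-- ===== PORT B =====
-- _vee recurses on the decreasing integer i; ported with a Nat argument (the same values) for termination.
def pvVee : Nat → List Int
  | 0 => []
  | 1 => [1]
  | (n + 2) => [(n : Int) + 2] ++ pvVee (n + 1) ++ [(n : Int) + 2]

def calculate_cards_per_round_alt (num_players : Int) : List Int :=
  let max_cards := PySem.Int.floordiv 52 num_players
  if max_cards < 1 then []
  else max_cards :: pvVee (max_cards - 1).toNat

-- ===== PRECONDITION & SPEC =====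
-- Pre_ excludes exactly num_players = 0, where Python A raises ZeroDivisionError.
def Pre_calculate_cards_per_round (num_players : Int) : Prop := num_players ≠ 0
instance (num_players : Int) : Decidable (Pre_calculate_cards_per_round num_players) := by unfold Pre_calculate_cards_per_round; infer_instance
def pvWitness_calculate_cards_per_round : Int := 5
def Spec_calculate_cards_per_round (num_players : Int) (out : List Int) : Prop := out = calculate_cards_per_round_alt num_players
instance (num_players : Int) (out : List Int) : Decidable (Spec_calculate_cards_per_round num_players out) := by unfold Spec_calculate_cards_per_round; infer_instance

-- ===== CLAIM (what is proved, stated in full; the proofs are below) =====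
def Claim_equal_calculate_cards_per_round : Prop := ∀ (num_players : Int), Dom_calculate_cards_per_round num_players → Pre_calculate_cards_per_round num_players → Spec_calculate_cards_per_round num_players (calculate_cards_per_round num_players)

-- ===== LEMMAS AND PROOFS =====

-- the V built recursively is countdown n..1 followed by 2..n
lemma pvVee_eq (n : Nat) :
    pvVee n = PySem.List.pyRange (n : Int) 0 (-1) ++ PySem.List.pyRange 2 ((n : Int) + 1) 1 := by
  induction n using pvVee.induct with
  | case1 =>
      simp [pvVee, PySem.List.pyRange_neg_one_eq_nil (by omega : (0:Int) ≤ 0)]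
  | case2 => decide
  | case3 n ih =>
      have e : ((n : Int) + 1) + 1 = (n : Int) + 2 := by ring
      have hdown : PySem.List.pyRange ((n : Int) + 2) 0 (-1)
          = ((n : Int) + 2) :: PySem.List.pyRange ((n : Int) + 1) 0 (-1) := by
        rw [PySem.List.pyRange_neg_one_cons (by omega)]; ring_nf
      have hup : PySem.List.pyRange 2 ((n : Int) + 2 + 1) 1
          = PySem.List.pyRange 2 ((n : Int) + 2) 1 ++ [(n : Int) + 2] :=
        PySem.List.pyRange_one_succ_right (by omega)
      push_cast at ih
      rw [e] at ih
      simp only [pvVee]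
      push_cast
      rw [e, hdown, hup, ih]
      simp

-- ===== VERDICT (by name: the statement is the Claim_ definition above) =====
theorem calculate_cards_per_round_spec : Claim_equal_calculate_cards_per_round := by
  intro n _ _
  unfold Spec_calculate_cards_per_round calculate_cards_per_round calculate_cards_per_round_alt
  simp only [PySem.List.foldl_append_singleton, List.nil_append]
  set m := PySem.Int.floordiv 52 n with hm
  by_cases h : m < 1
  · rw [if_pos h,
      PySem.List.pyRange_neg_one_eq_nil (by omega : m ≤ 0),
      PySem.List.pyRange_one_eq_nil (by omega : m ≤ 2)]
    simp
  · rw [if_neg h, pvVee_eq]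
    have h1 : (((m - 1).toNat : Int)) = m - 1 := by omega
    rw [h1]
    have hdown : PySem.List.pyRange m 0 (-1) = m :: PySem.List.pyRange (m - 1) 0 (-1) :=
      PySem.List.pyRange_neg_one_cons (by omega)
    have : m - 1 + 1 = m := by ring
    rw [hdown, this]
    simp
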